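-- pv_equiv track=rewrite | github.com/oscisn93/microbiome_master_db | scripts/name_comparison/compare_names.py | compare_organism_names
-- ===== SOURCE A (Python) =====
-- def compare_organism_names(database1, database2):
--     complete_match = []
--     one_match = []
--     database1_no_match = []
--     database2_no_match = []
--
--     for name1 in database1:
--         found_match = False
--
--         for name2 in database2:
--             if name1 == name2:
--                 complete_match.append(name1)
--                 found_match = True
--                 break
--
--             words1 = name1.split()
--             words2 = name2.split()
--
--             if len(words1) == 2 and len(words2) == 2:
--                 if words1[0] == words2[0] or words1[0] == words2[1] or words1[1] == words2[0] or words1[1] == words2[1]: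
--                     one_match.append((name1, name2))
--                     found_match = True
--                     break
--
--         if not found_match:
--             database1_no_match.append(name1)
--
--     for name2 in database2:
--         if name2 not in database1:
--             database2_no_match.append(name2)
--
--     return complete_match, one_match, database1_no_match, database2_no_match
-- ===== SOURCE B (Python) =====
-- def compare_organism_names(database1, database2):
--     # One pass over database2 builds two first-occurrence indexes, then each
--     # database1 name is classified by a dictionary lookup instead of a scan.
--     exact = {}      # name -> earliest index in database2
--     word_idx = {}   # word -> (earliest index, name) over 2-word names containing it
--     for j, name2 in enumerate(database2):
--         exact.setdefault(name2, j)
--         words2 = name2.split()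
--         if len(words2) == 2:
--             for w in words2:
--                 word_idx.setdefault(w, (j, name2))
--
--     complete_match = []
--     one_match = []
--     database1_no_match = []
--     for name1 in database1:
--         je = exact.get(name1)
--         words1 = name1.split()
--         best = None
--         if len(words1) == 2:
--             c0 = word_idx.get(words1[0])
--             c1 = word_idx.get(words1[1])
--             if c0 is None:
--                 best = c1
--             elif c1 is None or c0[0] <= c1[0]:
--                 best = c0
--             else:
--                 best = c1
--         if je is not None and (best is None or je <= best[0]):
--             complete_match.append(name1)
--         elif best is not None:
--             one_match.append((name1, best[1]))
--         else:
--             database1_no_match.append(name1)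
--
--     seen1 = set(database1)
--     database2_no_match = [n for n in database2 if n not in seen1]
--     return complete_match, one_match, database1_no_match, database2_no_match
-- ===== Notes on version B (the rewrite author's own statement) =====
-- stated objective: faster
-- what changed: Replaces the nested scan of database2 per database1 name by two first-occurrence hash indexes (name->earliest index, word->(earliest index, name) over 2-word names) built in one pass, classifying each database1 name by O(1) lookups, and uses a set of database1 for the final no-match pass.
import Mathlib
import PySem

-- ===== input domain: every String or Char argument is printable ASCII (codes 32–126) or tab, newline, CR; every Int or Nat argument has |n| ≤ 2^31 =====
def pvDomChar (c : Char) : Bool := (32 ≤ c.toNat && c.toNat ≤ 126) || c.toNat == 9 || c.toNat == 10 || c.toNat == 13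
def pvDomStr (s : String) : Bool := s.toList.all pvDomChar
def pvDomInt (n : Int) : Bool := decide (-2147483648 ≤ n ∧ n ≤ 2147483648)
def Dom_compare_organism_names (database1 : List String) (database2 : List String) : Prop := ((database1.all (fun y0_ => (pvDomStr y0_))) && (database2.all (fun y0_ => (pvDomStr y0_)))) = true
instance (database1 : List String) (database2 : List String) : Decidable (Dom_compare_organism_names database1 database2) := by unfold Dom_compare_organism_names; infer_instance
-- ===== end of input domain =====

-- B replaces A's per-name scan of database2 by two first-occurrence indexes built in one
-- pass over database2 (objective: faster; a timing run measures the speed-up).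

-- ===== PORT A =====
-- inner 'for name2 in database2: … break' loop of A, threading the two output lists and found_match
def pvInnerA (name1 : String) (db2 : List String) (complete : List String)
    (one : List (String × String)) : List String × List (String × String) × Bool :=
  match db2 with
  | [] => (complete, one, false)
  | name2 :: rest =>
    if name1 == name2 then (complete ++ [name1], one, true)
    else
      let words1 := PySem.Str.split₀ name1
      let words2 := PySem.Str.split₀ name2
      if words1.length == 2 && words2.length == 2 then
        if PySem.List.pyGetD words1 0 "" == PySem.List.pyGetD words2 0 ""
            || PySem.List.pyGetD words1 0 "" == PySem.List.pyGetD words2 1 ""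
            || PySem.List.pyGetD words1 1 "" == PySem.List.pyGetD words2 0 ""
            || PySem.List.pyGetD words1 1 "" == PySem.List.pyGetD words2 1 "" then
          (complete, one ++ [(name1, name2)], true)
        else pvInnerA name1 rest complete one
      else pvInnerA name1 rest complete one

def compare_organism_names (database1 : List String) (database2 : List String) :
    List String × (List (String × String)) × List String × List String :=
  let st := database1.foldl
    (fun (st : List String × List (String × String) × List String) name1 =>
      let r := pvInnerA name1 database2 st.1 st.2.1
      if r.2.2 then (r.1, r.2.1, st.2.2) else (r.1, r.2.1, st.2.2 ++ [name1]))
    ([], [], [])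
  let database2_no_match := database2.foldl
    (fun acc name2 => if database1.contains name2 then acc else acc ++ [name2]) []
  (st.1, st.2.1, st.2.2, database2_no_match)

-- ===== PORT B =====
-- one pass over enumerate(database2): exact = {name: earliest j}, word_idx = {word: (earliest j, name)}
def pvBuild (database2 : List String) :
    PySem.Dict String Int × PySem.Dict String (Int × String) :=
  (PySem.List.enumerate database2).foldl
    (fun (st : PySem.Dict String Int × PySem.Dict String (Int × String)) p =>
      (st.1.setdefault p.2 p.1,
       if (PySem.Str.split₀ p.2).length == 2 then
         (PySem.Str.split₀ p.2).foldl (fun d w => d.setdefault w (p.1, p.2)) st.2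
       else st.2))
    (PySem.Dict.empty, PySem.Dict.empty)

-- classification of one database1 name from the two indexes (B's loop body)
def pvClassify (exact : PySem.Dict String Int) (word_idx : PySem.Dict String (Int × String))
    (st : List String × List (String × String) × List String) (name1 : String) :
    List String × List (String × String) × List String :=
  let je := exact.get? name1
  let words1 := PySem.Str.split₀ name1
  let best : Option (Int × String) :=
    if words1.length == 2 then
      let c0 := word_idx.get? (PySem.List.pyGetD words1 0 "")
      let c1 := word_idx.get? (PySem.List.pyGetD words1 1 "")
      match c0, c1 with
      | none, _ => c1
      | some b0, none => some b0
      | some b0, some b1 => if b0.1 ≤ b1.1 then some b0 else some b1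
    else none
  match je, best with
  | some _, none => (st.1 ++ [name1], st.2.1, st.2.2)
  | some j, some b =>
      if j ≤ b.1 then (st.1 ++ [name1], st.2.1, st.2.2)
      else (st.1, st.2.1 ++ [(name1, b.2)], st.2.2)
  | none, some b => (st.1, st.2.1 ++ [(name1, b.2)], st.2.2)
  | none, none => (st.1, st.2.1, st.2.2 ++ [name1])

def compare_organism_names_alt (database1 : List String) (database2 : List String) :
    List String × (List (String × String)) × List String × List String :=
  let idx := pvBuild database2
  let st := database1.foldl (pvClassify idx.1 idx.2) ([], [], [])
  let seen1 : PySem.Set String := PySem.Set.ofList database1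
  let database2_no_match := database2.filter (fun n => !(PySem.Set.contains seen1 n))
  (st.1, st.2.1, st.2.2, database2_no_match)

-- ===== PRECONDITION & SPEC =====
def Spec_compare_organism_names (database1 : List String) (database2 : List String) (out : List String × (List (String × String)) × List String × List String) : Prop := out = compare_organism_names_alt database1 database2
instance (database1 : List String) (database2 : List String) (out : List String × (List (String × String)) × List String × List String) : Decidable (Spec_compare_organism_names database1 database2 out) := by unfold Spec_compare_organism_names; infer_instance

-- ===== CLAIM (what is proved, stated in full; the proofs are below) =====
def Claim_equal_compare_organism_names : Prop := ∀ (database1 : List String) (database2 : List String), Dom_compare_organism_names database1 database2 → Spec_compare_organism_names database1 database2 (compare_organism_names database1 database2)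

-- ===== LEMMAS AND PROOFS =====

-- A's word-overlap condition on a pair of names
def pvCondB (name1 name2 : String) : Bool :=
  let words1 := PySem.Str.split₀ name1
  let words2 := PySem.Str.split₀ name2
  words1.length == 2 && words2.length == 2 &&
    (PySem.List.pyGetD words1 0 "" == PySem.List.pyGetD words2 0 ""
      || PySem.List.pyGetD words1 0 "" == PySem.List.pyGetD words2 1 ""
      || PySem.List.pyGetD words1 1 "" == PySem.List.pyGetD words2 0 ""
      || PySem.List.pyGetD words1 1 "" == PySem.List.pyGetD words2 1 "")

-- the outcome of A's inner loop, abstracted from the accumulators: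
-- none = no match, some none = complete match, some (some n2) = partial match with n2
def pvFind (name1 : String) : List String → Option (Option String)
  | [] => none
  | n2 :: rest =>
    if name1 == n2 then some none
    else if pvCondB name1 n2 then some (some n2)
    else pvFind name1 rest

def pvFirstEq (name1 : String) : List String → Int → Option Int
  | [], _ => none
  | n :: rest, s => if name1 == n then some s else pvFirstEq name1 rest (s + 1)

def pvFirstW (w : String) : List String → Int → Option (Int × String)
  | [], _ => none
  | n :: rest, s =>
    if (PySem.Str.split₀ n).length == 2 && (PySem.Str.split₀ n).contains w then some (s, n)
    else pvFirstW w rest (s + 1)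

def pvBestF (name1 : String) : List String → Int → Option (Int × String)
  | [], _ => none
  | n :: rest, s => if pvCondB name1 n then some (s, n) else pvBestF name1 rest (s + 1)

def pvCombine (o1 o2 : Option (Int × String)) : Option (Int × String) :=
  match o1, o2 with
  | none, _ => o2
  | some b0, none => some b0
  | some b0, some b1 => if b0.1 ≤ b1.1 then some b0 else some b1

def pvDecide (je : Option Int) (best : Option (Int × String)) : Option (Option String) :=
  match je, best with
  | some _, none => some none
  | some j, some b => if j ≤ b.1 then some none else some (some b.2)
  | none, some b => some (some b.2)
  | none, none => none

theorem pvInnerA_eq_find (name1 : String) (db2 : List String) (c : List String)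
    (o : List (String × String)) :
    pvInnerA name1 db2 c o =
      match pvFind name1 db2 with
      | none => (c, o, false)
      | some none => (c ++ [name1], o, true)
      | some (some n2) => (c, o ++ [(name1, n2)], true) := by
  induction db2 generalizing c o with
  | nil => simp [pvInnerA, pvFind]
  | cons n rest ih =>
    simp only [pvInnerA, pvFind, pvCondB]
    by_cases h1 : (name1 == n) = true
    · simp [h1]
    · simp only [h1, if_false, Bool.false_eq_true]
      by_cases h2 : ((PySem.Str.split₀ name1).length == 2 && (PySem.Str.split₀ n).length == 2) = true
      · by_cases h3 : (PySem.List.pyGetD (PySem.Str.split₀ name1) 0 "" == PySem.List.pyGetD (PySem.Str.split₀ n) 0 ""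
            || PySem.List.pyGetD (PySem.Str.split₀ name1) 0 "" == PySem.List.pyGetD (PySem.Str.split₀ n) 1 ""
            || PySem.List.pyGetD (PySem.Str.split₀ name1) 1 "" == PySem.List.pyGetD (PySem.Str.split₀ n) 0 ""
            || PySem.List.pyGetD (PySem.Str.split₀ name1) 1 "" == PySem.List.pyGetD (PySem.Str.split₀ n) 1 "") = true
        · simp only [Bool.and_assoc] at h2 ⊢
          simp [h2, h3]
        · simp only [Bool.and_assoc] at h2 ⊢
          simp [h2, h3, ih]
      · simp only [Bool.and_assoc] at h2 ⊢
        rw [if_neg h2]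
        simp only [Bool.and_eq_true, not_and] at h2
        by_cases h2a : ((PySem.Str.split₀ name1).length == 2) = true
        · simp [h2a, h2 h2a, ih]
        · simp [h2a, ih]

theorem pvFirstEq_bound (name1 : String) (db2 : List String) (s j : Int)
    (h : pvFirstEq name1 db2 s = some j) : s ≤ j := by
  induction db2 generalizing s with
  | nil => simp [pvFirstEq] at h
  | cons n rest ih =>
    simp only [pvFirstEq] at h
    split at h
    · simp only [Option.some.injEq] at h; omega
    · have := ih (s + 1) h; omega

theorem pvFirstW_bound (w : String) (db2 : List String) (s : Int) (b : Int × String)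
    (h : pvFirstW w db2 s = some b) : s ≤ b.1 := by
  induction db2 generalizing s with
  | nil => simp [pvFirstW] at h
  | cons n rest ih =>
    simp only [pvFirstW] at h
    split at h
    · simp only [Option.some.injEq] at h; subst h; simp
    · have := ih (s + 1) h; omega

theorem pvBestF_bound (name1 : String) (db2 : List String) (s : Int) (b : Int × String)
    (h : pvBestF name1 db2 s = some b) : s ≤ b.1 := by
  induction db2 generalizing s with
  | nil => simp [pvBestF] at h
  | cons n rest ih =>
    simp only [pvBestF] at h
    split at h
    · simp only [Option.some.injEq] at h; subst h; simp
    · have := ih (s + 1) h; omega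

theorem pvFind_eq_decide (name1 : String) (db2 : List String) (s : Int) :
    pvFind name1 db2 = pvDecide (pvFirstEq name1 db2 s) (pvBestF name1 db2 s) := by
  induction db2 generalizing s with
  | nil => simp [pvFind, pvFirstEq, pvBestF, pvDecide]
  | cons n rest ih =>
    simp only [pvFind, pvFirstEq, pvBestF]
    by_cases h1 : (name1 == n) = true
    · rw [if_pos h1, if_pos h1]
      rcases hb : (if pvCondB name1 n = true then some ((s : Int), n) else pvBestF name1 rest (s + 1)) with _ | b
      · simp [pvDecide]
      · have hsb : s ≤ b.1 := by
          split at hb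
          · simp only [Option.some.injEq] at hb; subst hb; simp
          · have := pvBestF_bound name1 rest (s + 1) b hb; omega
        simp [pvDecide, hsb]
    · rw [if_neg h1, if_neg h1]
      by_cases h2 : pvCondB name1 n = true
      · rw [if_pos h2, if_pos h2]
        rcases he : pvFirstEq name1 rest (s + 1) with _ | j
        · simp [pvDecide]
        · have := pvFirstEq_bound name1 rest (s + 1) j he
          have : ¬ (j ≤ s) := by omega
          simp [pvDecide, this]
      · rw [if_neg h2, if_neg h2]
        exact ih (s + 1)

theorem pvBestF_of_len_ne (name1 : String) (db2 : List String) (s : Int)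
    (h : ((PySem.Str.split₀ name1).length == 2) = false) :
    pvBestF name1 db2 s = none := by
  induction db2 generalizing s with
  | nil => simp [pvBestF]
  | cons n rest ih =>
    simp only [pvBestF, pvCondB]
    rw [if_neg (by simp only [Bool.and_assoc, Bool.and_eq_true]; intro hc; rw [h] at hc; simp at hc)]
    exact ih (s + 1)

theorem pvBestF_eq_combine (name1 : String) (db2 : List String) (s : Int) (a b : String)
    (h : PySem.Str.split₀ name1 = [a, b]) :
    pvBestF name1 db2 s = pvCombine (pvFirstW a db2 s) (pvFirstW b db2 s) := by
  have hcond : ∀ n, pvCondB name1 n = true ↔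
      ((PySem.Str.split₀ n).length = 2 ∧ (a ∈ PySem.Str.split₀ n ∨ b ∈ PySem.Str.split₀ n)) := by
    intro n
    by_cases hlen : (PySem.Str.split₀ n).length = 2
    · obtain ⟨c, d, hcd⟩ := List.length_eq_two.mp hlen
      simp [pvCondB, h, hcd, pysem]
      tauto
    · simp [pvCondB, hlen]
  induction db2 generalizing s with
  | nil => simp [pvBestF, pvFirstW, pvCombine]
  | cons n rest ih =>
    simp only [pvBestF, pvFirstW]
    by_cases hc : pvCondB name1 n = true
    · rw [if_pos hc]
      obtain ⟨hlen, hmem⟩ := (hcond n).mp hc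
      have hlen' : ((PySem.Str.split₀ n).length == 2) = true := by simp [hlen]
      rcases hmem with ha | hb
      · rw [if_pos (by simp [hlen', ha])]
        by_cases hb : b ∈ PySem.Str.split₀ n
        · rw [if_pos (by simp [hlen', hb])]
          simp [pvCombine]
        · rw [if_neg (by simp [hlen', hb])]
          rcases hw : pvFirstW b rest (s + 1) with _ | b1
          · simp [pvCombine]
          · have := pvFirstW_bound b rest (s + 1) b1 hw
            simp [pvCombine]
            omega
      · by_cases ha : a ∈ PySem.Str.split₀ n
        · rw [if_pos (by simp [hlen', ha]),
              if_pos (by simp [hlen', hb])]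
          simp [pvCombine]
        · rw [if_neg (by simp [hlen', ha]),
              if_pos (by simp [hlen', hb])]
          rcases hw : pvFirstW a rest (s + 1) with _ | b0
          · simp [pvCombine]
          · have := pvFirstW_bound a rest (s + 1) b0 hw
            have : ¬ (b0.1 ≤ s) := by omega
            simp [pvCombine, this]
    · rw [if_neg hc]
      by_cases hlen : (PySem.Str.split₀ n).length = 2
      · have hna : a ∉ PySem.Str.split₀ n := fun hm => hc ((hcond n).mpr ⟨hlen, Or.inl hm⟩)
        have hnb : b ∉ PySem.Str.split₀ n := fun hm => hc ((hcond n).mpr ⟨hlen, Or.inr hm⟩)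
        rw [if_neg (by simp; intro _ hm; exact absurd hm hna),
            if_neg (by simp; intro _ hm; exact absurd hm hnb)]
        exact ih (s + 1)
      · have hlen' : ((PySem.Str.split₀ n).length == 2) = false := by simp [hlen]
        rw [if_neg (by simp [hlen']), if_neg (by simp [hlen'])]
        exact ih (s + 1)

theorem pvSetdefault_fold_get? (ws : List String) (v : Int × String)
    (d : PySem.Dict String (Int × String)) (x : String) :
    (ws.foldl (fun d w => d.setdefault w v) d).get? x =
      if x ∈ ws then some ((d.get? x).getD v) else d.get? x := by
  induction ws generalizing d with
  | nil => simp
  | cons w t ih =>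
    simp only [List.foldl_cons, ih]
    by_cases hx : x = w
    · subst hx
      rcases hmem : decide (x ∈ t) with _ | _ <;> simp_all [PySem.Dict.get?_setdefault_self]
    · rw [PySem.Dict.get?_setdefault_of_ne _ _ hx]
      simp [List.mem_cons, hx]

theorem pvBuild_fst_get? (db2 : List String) (s : Int) (d1 : PySem.Dict String Int)
    (d2 : PySem.Dict String (Int × String)) (k : String) :
    (((PySem.List.enumerate db2 s).foldl
      (fun (st : PySem.Dict String Int × PySem.Dict String (Int × String)) p =>
        (st.1.setdefault p.2 p.1,
         if (PySem.Str.split₀ p.2).length == 2 then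
           (PySem.Str.split₀ p.2).foldl (fun d w => d.setdefault w (p.1, p.2)) st.2
         else st.2))
      (d1, d2)).1).get? k = (d1.get? k).or (pvFirstEq k db2 s) := by
  induction db2 generalizing s d1 d2 with
  | nil => simp [pvFirstEq]
  | cons n rest ih =>
    rw [PySem.List.enumerate_cons]
    simp only [List.foldl_cons, ih, pvFirstEq]
    by_cases hk : k = n
    · subst hk
      rw [PySem.Dict.get?_setdefault_self]
      rcases d1.get? k with _ | v <;> simp
    · rw [PySem.Dict.get?_setdefault_of_ne _ _ hk]
      rw [if_neg (by simp [hk])]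

theorem pvBuild_snd_get? (db2 : List String) (s : Int) (d1 : PySem.Dict String Int)
    (d2 : PySem.Dict String (Int × String)) (w : String) :
    (((PySem.List.enumerate db2 s).foldl
      (fun (st : PySem.Dict String Int × PySem.Dict String (Int × String)) p =>
        (st.1.setdefault p.2 p.1,
         if (PySem.Str.split₀ p.2).length == 2 then
           (PySem.Str.split₀ p.2).foldl (fun d w => d.setdefault w (p.1, p.2)) st.2
         else st.2))
      (d1, d2)).2).get? w = (d2.get? w).or (pvFirstW w db2 s) := by
  induction db2 generalizing s d1 d2 with
  | nil => simp [pvFirstW]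
  | cons n rest ih =>
    rw [PySem.List.enumerate_cons]
    simp only [List.foldl_cons, ih, pvFirstW]
    by_cases hlen : ((PySem.Str.split₀ n).length == 2) = true
    · rw [if_pos hlen, pvSetdefault_fold_get?]
      by_cases hw : w ∈ PySem.Str.split₀ n
      · rw [if_pos hw, if_pos (by simp [hlen, hw])]
        rcases d2.get? w with _ | v <;> simp
      · rw [if_neg hw, if_neg (by simp [hw])]
    · rw [if_neg hlen, if_neg (by simp [hlen])]

theorem pvStep_eq (db2 : List String) (st : List String × List (String × String) × List String)
    (name1 : String) :
    (fun (st : List String × List (String × String) × List String) name1 =>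
      let r := pvInnerA name1 db2 st.1 st.2.1
      if r.2.2 then (r.1, r.2.1, st.2.2) else (r.1, r.2.1, st.2.2 ++ [name1])) st name1
    = pvClassify (pvBuild db2).1 (pvBuild db2).2 st name1 := by
  have hE : (pvBuild db2).1.get? name1 = pvFirstEq name1 db2 0 := by
    unfold pvBuild
    rw [pvBuild_fst_get?]
    simp
  have hfind := pvFind_eq_decide name1 db2 0
  unfold pvClassify
  dsimp only
  rw [pvInnerA_eq_find, hE, hfind]
  by_cases hlen : ((PySem.Str.split₀ name1).length == 2) = true
  · obtain ⟨a, b, hab⟩ := List.length_eq_two.mp (by simpa using hlen)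
    have hW0 : (pvBuild db2).2.get? (PySem.List.pyGetD (PySem.Str.split₀ name1) 0 "")
        = pvFirstW a db2 0 := by
      unfold pvBuild
      rw [pvBuild_snd_get?]
      simp [hab, pysem]
    have hW1 : (pvBuild db2).2.get? (PySem.List.pyGetD (PySem.Str.split₀ name1) 1 "")
        = pvFirstW b db2 0 := by
      unfold pvBuild
      rw [pvBuild_snd_get?]
      simp [hab, pysem]
    rw [if_pos hlen, hW0, hW1, pvBestF_eq_combine name1 db2 0 a b hab]
    rcases pvFirstEq name1 db2 0 with _ | j <;>
      rcases hfa : pvFirstW a db2 0 with _ | b0 <;>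
      rcases hfb : pvFirstW b db2 0 with _ | b1 <;>
      simp only [pvCombine, pvDecide] <;> split_ifs <;> (try simp_all) <;>
        (try split_ifs) <;> simp_all
  · rw [if_neg hlen, pvBestF_of_len_ne name1 db2 0 (by simpa using hlen)]
    rcases pvFirstEq name1 db2 0 with _ | j <;> simp [pvDecide]

theorem pvNoMatch2_eq (database1 database2 : List String) :
    database2.foldl
      (fun acc name2 => if database1.contains name2 then acc else acc ++ [name2]) []
    = database2.filter (fun n => !(PySem.Set.contains (PySem.Set.ofList database1) n)) := by
  rw [PySem.List.foldl_congr_mem database2 _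
    (fun acc n2 => if (!(PySem.Set.contains (PySem.Set.ofList database1) n2)) = true
      then acc ++ [n2] else acc) [] ?_]
  · rw [PySem.List.foldl_append_if_eq_filter]
    simp
  · intro acc x _
    by_cases hm : x ∈ database1
    · have h2 : PySem.Set.contains (PySem.Set.ofList database1) x = true := by
        rw [PySem.Set.contains_iff]
        exact (PySem.Set.mem_ofList _ _).mpr hm
      simp [hm]
    · have h2 : PySem.Set.contains (PySem.Set.ofList database1) x = false := by
        rw [Bool.eq_false_iff]
        intro hc
        exact hm ((PySem.Set.mem_ofList _ _).mp ((PySem.Set.contains_iff _ _).mp hc))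
      simp [hm]

-- ===== VERDICT (by name: the statement is the Claim_ definition above) =====
theorem compare_organism_names_spec : Claim_equal_compare_organism_names := by
  intro database1 database2 _dom
  unfold Spec_compare_organism_names compare_organism_names compare_organism_names_alt
  rw [PySem.List.foldl_congr_mem database1 _
        (pvClassify (pvBuild database2).1 (pvBuild database2).2) ([], [], [])
        (fun acc x _ => pvStep_eq database2 acc x),
      pvNoMatch2_eq]
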